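-- pv_equiv track=rewrite | github.com/johnivanov04/spotify-playlist-splitter | ml_pipeline/scripts/build_display_groups.py | pick_display_group
-- ===== SOURCE A (Python) =====
-- from typing import Any
--
-- def norm(text: str) -> str:
--     return (text or "").strip().lower()
--
-- def pick_display_group(cluster_name: str, top_features: list[dict[str, Any]]) -> str:
--     name = norm(cluster_name)
--
--     # Primary routing: trust the cluster name first.
--     if "mixed vibe cluster" in name:
--         return "More Picks"
--
--     if "breakbeat" in name or "soundtrack" in name:
--         return "Instrumental / Breakbeat"
--
--     if "cool jazz" in name or name == "jazz / cool jazz" or "jazz /" in name or "/ jazz" in name: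
--         return "Jazz / Nujabes / Downtempo"
--
--     if any(k in name for k in ["singer songwriter", "acoustic"]):
--         return "Acoustic / Chill"
--
--     if any(k in name for k in [
--         "rock", "indie", "alternative", "punk", "grunge", "emo"
--     ]):
--         return "Rock / Indie"
--
--     if any(k in name for k in [
--         "r and b", "r b", "soul", "neo soul", "alternative r and b", "contemporary r and b",
--         "psychedelic soul",
--     ]):
--         return "R&B / Soul"
--
--     if any(k in name for k in [
--         "trap", "thug rap", "southern hip hop"
--     ]):
--         return "Trap"
--
--     if any(k in name for k in [
--         "rap", "hip hop", "pop rap", "conscious hip hop",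
--         "underground hip hop", "west coast hip hop", "hardcore hip hop"
--     ]):
--         return "Rap / Hip-Hop"
--
--     # Only use top features as fallback when the cluster name is weak/generic.
--     feat_names = [norm(f.get("pretty_feature", "")) for f in top_features]
--     feat_text = " ".join(feat_names)
--
--     if any(k in feat_text for k in [
--         "breakbeat", "soundtrack", "trip hop"
--     ]):
--         return "Instrumental / Breakbeat"
--
--     if any(k in feat_text for k in [
--         "cool jazz", "jazz rap", "jazz", "downtempo"
--     ]):
--         return "Jazz / Nujabes / Downtempo"
--
--     if any(k in feat_text for k in [
--         "singer songwriter", "folk", "acoustic guitar"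
--     ]):
--         return "Acoustic / Chill"
--
--     if any(k in feat_text for k in [
--         "rock", "indie", "alternative", "punk", "grunge", "britpop", "post punk"
--     ]):
--         return "Rock / Indie"
--
--     if any(k in feat_text for k in [
--         "r and b", "soul", "neo soul", "alternative r and b", "contemporary r and b",
--         "psychedelic soul",
--     ]):
--         return "R&B / Soul"
--
--     if any(k in feat_text for k in [
--         "trap", "thug rap", "southern hip hop"
--     ]):
--         return "Trap"
--
--     if any(k in feat_text for k in [
--         "rap", "hip hop", "pop rap", "conscious hip hop",
--         "underground hip hop", "west coast hip hop", "hardcore hip hop"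
--     ]):
--         return "Rap / Hip-Hop"
--
--     if any(k in feat_text for k in [
--         "mood party", "danceable", "voice instrumental",
--         "timbre / dark", "timbre / bright", "aggressive"
--     ]):
--         return "Melodic / Party Rap"
--
--     return "More Picks"
-- ===== SOURCE B (Python) =====
-- # Alternative algorithm: instead of A's ordered early-return cascade, score the
-- # text exhaustively -- test every keyword of a flat keyword->priority table and
-- # keep the minimum priority that matched (argmin); the group name is looked up
-- # by that priority.  The redundant name == "jazz / cool jazz" equality test is
-- # subsumed by the "jazz /" substring keyword.
--
-- _NAME_RULES = [
--     (("mixed vibe cluster",), "More Picks"),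
--     (("breakbeat", "soundtrack"), "Instrumental / Breakbeat"),
--     (("cool jazz", "jazz /", "/ jazz"), "Jazz / Nujabes / Downtempo"),
--     (("singer songwriter", "acoustic"), "Acoustic / Chill"),
--     (("rock", "indie", "alternative", "punk", "grunge", "emo"), "Rock / Indie"),
--     (("r and b", "r b", "soul", "neo soul", "alternative r and b",
--       "contemporary r and b", "psychedelic soul"), "R&B / Soul"),
--     (("trap", "thug rap", "southern hip hop"), "Trap"),
--     (("rap", "hip hop", "pop rap", "conscious hip hop",
--       "underground hip hop", "west coast hip hop", "hardcore hip hop"),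
--      "Rap / Hip-Hop"),
-- ]
--
-- _FEAT_RULES = [
--     (("breakbeat", "soundtrack", "trip hop"), "Instrumental / Breakbeat"),
--     (("cool jazz", "jazz rap", "jazz", "downtempo"), "Jazz / Nujabes / Downtempo"),
--     (("singer songwriter", "folk", "acoustic guitar"), "Acoustic / Chill"),
--     (("rock", "indie", "alternative", "punk", "grunge", "britpop", "post punk"),
--      "Rock / Indie"),
--     (("r and b", "soul", "neo soul", "alternative r and b",
--       "contemporary r and b", "psychedelic soul"), "R&B / Soul"),
--     (("trap", "thug rap", "southern hip hop"), "Trap"),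
--     (("rap", "hip hop", "pop rap", "conscious hip hop",
--       "underground hip hop", "west coast hip hop", "hardcore hip hop"),
--      "Rap / Hip-Hop"),
--     (("mood party", "danceable", "voice instrumental",
--       "timbre / dark", "timbre / bright", "aggressive"), "Melodic / Party Rap"),
-- ]
--
--
-- def _flat(rules):
--     out = []
--     for i, (kws, _group) in enumerate(rules):
--         for k in kws:
--             out.append((k, i))
--     return out
--
--
-- _NAME_KW = _flat(_NAME_RULES)
-- _NAME_GROUPS = [g for _, g in _NAME_RULES]
-- _FEAT_KW = _flat(_FEAT_RULES)
-- _FEAT_GROUPS = [g for _, g in _FEAT_RULES]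
--
--
-- def _best(text, kw_ranks):
--     best = None
--     for kw, r in kw_ranks:
--         if kw in text and (best is None or r < best):
--             best = r
--     return best
--
--
-- def pick_display_group(cluster_name, top_features):
--     name = (cluster_name or "").strip().lower()
--     b = _best(name, _NAME_KW)
--     if b is not None:
--         return _NAME_GROUPS[b]
--     feat_text = " ".join(
--         (f.get("pretty_feature", "") or "").strip().lower() for f in top_features
--     )
--     b = _best(feat_text, _FEAT_KW)
--     return _FEAT_GROUPS[b] if b is not None else "More Picks"
-- ===== Notes on version B (the rewrite author's own statement) =====
-- stated objective: alternative
-- what changed: Replaced A's ordered early-return if-cascade with exhaustive argmin scoring: every keyword of a flat keyword->priority table is tested against the text, the minimum matched priority is kept, and the group is looked up by that priority; the redundant name == 'jazz / cool jazz' test is subsumed by the 'jazz /' keyword.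
import Mathlib
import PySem

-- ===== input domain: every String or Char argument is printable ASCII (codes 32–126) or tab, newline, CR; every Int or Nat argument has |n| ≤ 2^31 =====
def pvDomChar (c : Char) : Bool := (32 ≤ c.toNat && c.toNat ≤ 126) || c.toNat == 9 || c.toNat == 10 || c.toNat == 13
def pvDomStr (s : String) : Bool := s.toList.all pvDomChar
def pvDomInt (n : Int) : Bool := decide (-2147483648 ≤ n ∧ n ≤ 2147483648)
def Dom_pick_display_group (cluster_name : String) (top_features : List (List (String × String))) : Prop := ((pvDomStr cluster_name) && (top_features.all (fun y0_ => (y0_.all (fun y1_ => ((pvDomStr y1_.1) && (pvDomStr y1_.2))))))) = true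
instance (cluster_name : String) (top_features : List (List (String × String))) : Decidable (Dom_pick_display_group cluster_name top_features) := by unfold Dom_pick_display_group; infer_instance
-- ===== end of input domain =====

-- B replaces A's ordered early-return cascade by exhaustive argmin keyword scoring; return value only.

-- ===== PORT A =====
def pvNorm (text : String) : String := PySem.Str.lower (PySem.Str.strip text)

def pick_display_group (cluster_name : String) (top_features : List (List (String × String))) : String :=
  let name := pvNorm cluster_name
  if PySem.Str.isIn "mixed vibe cluster" name then "More Picks"
  else if PySem.Str.isIn "breakbeat" name || PySem.Str.isIn "soundtrack" name then "Instrumental / Breakbeat"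
  else if PySem.Str.isIn "cool jazz" name || name == "jazz / cool jazz" || PySem.Str.isIn "jazz /" name || PySem.Str.isIn "/ jazz" name then "Jazz / Nujabes / Downtempo"
  else if ["singer songwriter", "acoustic"].any (fun k => PySem.Str.isIn k name) then "Acoustic / Chill"
  else if ["rock", "indie", "alternative", "punk", "grunge", "emo"].any (fun k => PySem.Str.isIn k name) then "Rock / Indie"
  else if ["r and b", "r b", "soul", "neo soul", "alternative r and b", "contemporary r and b", "psychedelic soul"].any (fun k => PySem.Str.isIn k name) then "R&B / Soul"
  else if ["trap", "thug rap", "southern hip hop"].any (fun k => PySem.Str.isIn k name) then "Trap"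
  else if ["rap", "hip hop", "pop rap", "conscious hip hop", "underground hip hop", "west coast hip hop", "hardcore hip hop"].any (fun k => PySem.Str.isIn k name) then "Rap / Hip-Hop"
  else
    let feat_names := top_features.map (fun f => pvNorm ((PySem.Dict.mk f).getD "pretty_feature" ""))
    let feat_text := PySem.Str.join " " feat_names
    if ["breakbeat", "soundtrack", "trip hop"].any (fun k => PySem.Str.isIn k feat_text) then "Instrumental / Breakbeat"
    else if ["cool jazz", "jazz rap", "jazz", "downtempo"].any (fun k => PySem.Str.isIn k feat_text) then "Jazz / Nujabes / Downtempo"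
    else if ["singer songwriter", "folk", "acoustic guitar"].any (fun k => PySem.Str.isIn k feat_text) then "Acoustic / Chill"
    else if ["rock", "indie", "alternative", "punk", "grunge", "britpop", "post punk"].any (fun k => PySem.Str.isIn k feat_text) then "Rock / Indie"
    else if ["r and b", "soul", "neo soul", "alternative r and b", "contemporary r and b", "psychedelic soul"].any (fun k => PySem.Str.isIn k feat_text) then "R&B / Soul"
    else if ["trap", "thug rap", "southern hip hop"].any (fun k => PySem.Str.isIn k feat_text) then "Trap"
    else if ["rap", "hip hop", "pop rap", "conscious hip hop", "underground hip hop", "west coast hip hop", "hardcore hip hop"].any (fun k => PySem.Str.isIn k feat_text) then "Rap / Hip-Hop"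
    else if ["mood party", "danceable", "voice instrumental", "timbre / dark", "timbre / bright", "aggressive"].any (fun k => PySem.Str.isIn k feat_text) then "Melodic / Party Rap"
    else "More Picks"

-- ===== PORT B =====
def pvNameRules : List (List String × String) :=
  [ (["mixed vibe cluster"], "More Picks"),
    (["breakbeat", "soundtrack"], "Instrumental / Breakbeat"),
    (["cool jazz", "jazz /", "/ jazz"], "Jazz / Nujabes / Downtempo"),
    (["singer songwriter", "acoustic"], "Acoustic / Chill"),
    (["rock", "indie", "alternative", "punk", "grunge", "emo"], "Rock / Indie"),
    (["r and b", "r b", "soul", "neo soul", "alternative r and b", "contemporary r and b", "psychedelic soul"], "R&B / Soul"),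
    (["trap", "thug rap", "southern hip hop"], "Trap"),
    (["rap", "hip hop", "pop rap", "conscious hip hop", "underground hip hop", "west coast hip hop", "hardcore hip hop"], "Rap / Hip-Hop") ]

def pvFeatRules : List (List String × String) :=
  [ (["breakbeat", "soundtrack", "trip hop"], "Instrumental / Breakbeat"),
    (["cool jazz", "jazz rap", "jazz", "downtempo"], "Jazz / Nujabes / Downtempo"),
    (["singer songwriter", "folk", "acoustic guitar"], "Acoustic / Chill"),
    (["rock", "indie", "alternative", "punk", "grunge", "britpop", "post punk"], "Rock / Indie"),
    (["r and b", "soul", "neo soul", "alternative r and b", "contemporary r and b", "psychedelic soul"], "R&B / Soul"),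
    (["trap", "thug rap", "southern hip hop"], "Trap"),
    (["rap", "hip hop", "pop rap", "conscious hip hop", "underground hip hop", "west coast hip hop", "hardcore hip hop"], "Rap / Hip-Hop"),
    (["mood party", "danceable", "voice instrumental", "timbre / dark", "timbre / bright", "aggressive"], "Melodic / Party Rap") ]

-- flat keyword -> priority table ('_flat' in Source B; priorities start at n)
def pvFlat (n : Nat) : List (List String × String) → List (String × Nat)
  | [] => []
  | r :: rest => r.1.map (fun k => (k, n)) ++ pvFlat (n+1) rest

def pvGroups (rules : List (List String × String)) : List String := rules.map (·.2)

-- one step of the '_best' loop in Source B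
def pvStep (text : String) (best : Option Nat) (kr : String × Nat) : Option Nat :=
  if PySem.Str.isIn kr.1 text && (match best with | none => true | some b => decide (kr.2 < b))
  then some kr.2 else best

def pvBest (text : String) (kws : List (String × Nat)) : Option Nat :=
  kws.foldl (pvStep text) none

def pick_display_group_alt (cluster_name : String) (top_features : List (List (String × String))) : String :=
  let name := PySem.Str.lower (PySem.Str.strip cluster_name)
  match pvBest name (pvFlat 0 pvNameRules) with
  | some b => (pvGroups pvNameRules).getD b ""
  | none =>
      let feat_text := PySem.Str.join " "
        (top_features.map (fun f => PySem.Str.lower (PySem.Str.strip ((PySem.Dict.mk f).getD "pretty_feature" ""))))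
      match pvBest feat_text (pvFlat 0 pvFeatRules) with
      | some b => (pvGroups pvFeatRules).getD b ""
      | none => "More Picks"

-- ===== PRECONDITION & SPEC =====
def Spec_pick_display_group (cluster_name : String) (top_features : List (List (String × String))) (out : String) : Prop := out = pick_display_group_alt cluster_name top_features
instance (cluster_name : String) (top_features : List (List (String × String))) (out : String) : Decidable (Spec_pick_display_group cluster_name top_features out) := by unfold Spec_pick_display_group; infer_instance

-- ===== CLAIM (what is proved, stated in full; the proofs are below) =====
def Claim_equal_pick_display_group : Prop := ∀ (cluster_name : String) (top_features : List (List (String × String))), Dom_pick_display_group cluster_name top_features → Spec_pick_display_group cluster_name top_features (pick_display_group cluster_name top_features)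

-- ===== LEMMAS AND PROOFS =====
-- first-match scan of the rule list (proof-only helper, the shape A's cascade reduces to)
def pvFirstMatch (text : String) : List (List String × String) → Option String
  | [] => none
  | (keywords, group) :: rest =>
      if keywords.any (fun k => PySem.Str.isIn k text) then some group
      else pvFirstMatch text rest

def pvFirstIdx (text : String) : List (List String × String) → Option Nat
  | [] => none
  | r :: rest =>
      if r.1.any (fun k => PySem.Str.isIn k text) then some 0
      else (pvFirstIdx text rest).map (· + 1)

-- once best = some b, keywords of priority m with ¬ m < b never replace it
theorem pvStep_const (text : String) (b m : Nat) (h : ¬ m < b) (kws : List String) :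
    (kws.map (fun k => (k, m))).foldl (pvStep text) (some b) = some b := by
  induction kws with
  | nil => rfl
  | cons k rest ih => simp [pvStep, h, ih]

theorem pvBest_stay (text : String) (b : Nat) (rules : List (List String × String)) :
    ∀ m, b < m → (pvFlat m rules).foldl (pvStep text) (some b) = some b := by
  induction rules with
  | nil => intro m _; rfl
  | cons r rest ih =>
      intro m hm
      rw [pvFlat, List.foldl_append, pvStep_const text b m (Nat.not_lt.mpr (Nat.le_of_lt hm))]
      exact ih (m+1) (Nat.lt_succ_of_lt hm)

theorem pvBest_none_block (text : String) (n : Nat) (kws : List String) :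
    (kws.map (fun k => (k, n))).foldl (pvStep text) none
    = (if kws.any (fun k => PySem.Str.isIn k text) then some n else none) := by
  induction kws with
  | nil => rfl
  | cons k rest ih =>
      rw [List.map_cons, List.foldl_cons, List.any_cons]
      cases h : PySem.Str.isIn k text with
      | true =>
          have hs : pvStep text none (k, n) = some n := by simp only [pvStep, h]; simp
          rw [hs, pvStep_const text n n (Nat.lt_irrefl n) rest]
          simp
      | false =>
          have hs : pvStep text none (k, n) = none := by simp only [pvStep, h]; simp
          rw [hs, ih]
          simp

theorem pvBest_from (text : String) (rules : List (List String × String)) :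
    ∀ n, (pvFlat n rules).foldl (pvStep text) none = (pvFirstIdx text rules).map (· + n) := by
  induction rules with
  | nil => intro n; rfl
  | cons r rest ih =>
      intro n
      rw [pvFlat, List.foldl_append, pvBest_none_block]
      simp only [pvFirstIdx]
      by_cases h : (r.1.any fun k => PySem.Str.isIn k text) = true
      · rw [if_pos h, if_pos h, pvBest_stay text n rest (n+1) (Nat.lt_succ_self n)]
        simp
      · rw [if_neg h, if_neg h, ih (n+1), Option.map_map]
        cases pvFirstIdx text rest with
        | none => rfl
        | some i => simp only [Option.map_some, Function.comp]; congr 1; omega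

theorem pvIdx_match (text : String) (rules : List (List String × String)) :
    (pvFirstIdx text rules).map (fun i => (pvGroups rules).getD i "") = pvFirstMatch text rules := by
  induction rules with
  | nil => rfl
  | cons r rest ih =>
      obtain ⟨kws, g⟩ := r
      simp only [pvFirstIdx, pvFirstMatch]
      by_cases h : (kws.any fun k => PySem.Str.isIn k text) = true
      · rw [if_pos h, if_pos h]
        simp [pvGroups]
      · rw [if_neg h, if_neg h, Option.map_map, ← ih]
        cases pvFirstIdx text rest with
        | none => rfl
        | some i => simp [pvGroups]

-- B's argmin lookup equals the first-match scan (with an arbitrary default)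
theorem pvLookup (text : String) (rules : List (List String × String)) (d : String) :
    (match pvBest text (pvFlat 0 rules) with
     | some b => (pvGroups rules).getD b ""
     | none => d)
    = (pvFirstMatch text rules).getD d := by
  rw [pvBest, pvBest_from text rules 0, ← pvIdx_match]
  cases pvFirstIdx text rules <;> simp

-- A's extra test name == "jazz / cool jazz" is subsumed by the "jazz /" substring test.
theorem pvJazz_eq (name : String) :
    (PySem.Str.isIn "cool jazz" name || name == "jazz / cool jazz" || PySem.Str.isIn "jazz /" name || PySem.Str.isIn "/ jazz" name)
    = (PySem.Str.isIn "cool jazz" name || PySem.Str.isIn "jazz /" name || PySem.Str.isIn "/ jazz" name) := by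
  by_cases h : name = "jazz / cool jazz"
  · subst h; decide
  · simp [beq_eq_false_iff_ne.mpr h]

-- A's if-chain equals the first-match scan over B's rule tables.
set_option maxHeartbeats 4000000 in
set_option maxRecDepth 4000 in
theorem pvChain_eq (name ftext : String) :
    (if PySem.Str.isIn "mixed vibe cluster" name then "More Picks"
     else if PySem.Str.isIn "breakbeat" name || PySem.Str.isIn "soundtrack" name then "Instrumental / Breakbeat"
     else if PySem.Str.isIn "cool jazz" name || name == "jazz / cool jazz" || PySem.Str.isIn "jazz /" name || PySem.Str.isIn "/ jazz" name then "Jazz / Nujabes / Downtempo"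
     else if ["singer songwriter", "acoustic"].any (fun k => PySem.Str.isIn k name) then "Acoustic / Chill"
     else if ["rock", "indie", "alternative", "punk", "grunge", "emo"].any (fun k => PySem.Str.isIn k name) then "Rock / Indie"
     else if ["r and b", "r b", "soul", "neo soul", "alternative r and b", "contemporary r and b", "psychedelic soul"].any (fun k => PySem.Str.isIn k name) then "R&B / Soul"
     else if ["trap", "thug rap", "southern hip hop"].any (fun k => PySem.Str.isIn k name) then "Trap"
     else if ["rap", "hip hop", "pop rap", "conscious hip hop", "underground hip hop", "west coast hip hop", "hardcore hip hop"].any (fun k => PySem.Str.isIn k name) then "Rap / Hip-Hop"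
     else if ["breakbeat", "soundtrack", "trip hop"].any (fun k => PySem.Str.isIn k ftext) then "Instrumental / Breakbeat"
     else if ["cool jazz", "jazz rap", "jazz", "downtempo"].any (fun k => PySem.Str.isIn k ftext) then "Jazz / Nujabes / Downtempo"
     else if ["singer songwriter", "folk", "acoustic guitar"].any (fun k => PySem.Str.isIn k ftext) then "Acoustic / Chill"
     else if ["rock", "indie", "alternative", "punk", "grunge", "britpop", "post punk"].any (fun k => PySem.Str.isIn k ftext) then "Rock / Indie"
     else if ["r and b", "soul", "neo soul", "alternative r and b", "contemporary r and b", "psychedelic soul"].any (fun k => PySem.Str.isIn k ftext) then "R&B / Soul"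
     else if ["trap", "thug rap", "southern hip hop"].any (fun k => PySem.Str.isIn k ftext) then "Trap"
     else if ["rap", "hip hop", "pop rap", "conscious hip hop", "underground hip hop", "west coast hip hop", "hardcore hip hop"].any (fun k => PySem.Str.isIn k ftext) then "Rap / Hip-Hop"
     else if ["mood party", "danceable", "voice instrumental", "timbre / dark", "timbre / bright", "aggressive"].any (fun k => PySem.Str.isIn k ftext) then "Melodic / Party Rap"
     else "More Picks")
    = (match pvFirstMatch name pvNameRules with
       | some group => group
       | none => (pvFirstMatch ftext pvFeatRules).getD "More Picks") := by
  rw [pvJazz_eq]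
  have hm : ∀ (c : Bool) (x : String) (o : Option String) (d : String),
      (match (if c = true then some x else o) with | some g => g | none => d)
      = if c = true then x else (match o with | some g => g | none => d) := by
    intro c x o d; cases c <;> simp
  have hg : ∀ (c : Bool) (x : String) (o : Option String) (d : String),
      (if c = true then some x else o).getD d = if c = true then x else o.getD d := by
    intro c x o d; cases c <;> simp
  simp only [pvNameRules, pvFeatRules, pvFirstMatch, List.any_cons, List.any_nil,
    Bool.or_false, Bool.or_assoc, hm, hg, Option.getD_none]

-- ===== VERDICT (by name: the statement is the Claim_ definition above) =====
set_option maxHeartbeats 2000000 in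
theorem pick_display_group_spec : Claim_equal_pick_display_group := by
  intro cluster_name top_features _
  unfold Spec_pick_display_group pick_display_group pick_display_group_alt pvNorm
  dsimp only
  rw [pvLookup, pvLookup]
  rw [pvChain_eq (PySem.Str.lower (PySem.Str.strip cluster_name))
    (PySem.Str.join " " (top_features.map (fun f =>
      PySem.Str.lower (PySem.Str.strip ((PySem.Dict.mk f).getD "pretty_feature" "")))))]
  cases pvFirstMatch (PySem.Str.lower (PySem.Str.strip cluster_name)) pvNameRules <;> simp
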